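-- pv_equiv track=rewrite | github.com/marcbeep/dsa | real-interviews/amazon-kspikes.py | kspikes
-- ===== SOURCE A (Python) =====
-- def kspikes(prices, K):
--     N = len(prices)
--     spikes = 0
--
--     for i in range(N):
--         smaller_before = 0
--         smaller_after = 0
--
--         for j in range(i):
--             if prices[j] < prices[i]:
--                 smaller_before += 1
--
--         for j in range(i + 1, N):
--             if prices[j] < prices[i]:
--                 smaller_after += 1
--
--         if smaller_before == K and smaller_after == K:
--             spikes += 1
--
--     return spikes
-- ===== SOURCE B (Python) =====
-- def _bisect_left(s, x):
--     lo, hi = 0, len(s)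
--     while lo < hi:
--         mid = (lo + hi) // 2
--         if s[mid] < x:
--             lo = mid + 1
--         else:
--             hi = mid
--     return lo
--
--
-- def kspikes(prices, K):
--     srt = sorted(prices)
--     seen = []
--     spikes = 0
--     for x in prices:
--         before = _bisect_left(seen, x)
--         if before == K and _bisect_left(srt, x) - before == K:
--             spikes += 1
--         seen.insert(before, x)
--     return spikes
-- ===== Notes on version B (the rewrite author's own statement) =====
-- stated objective: faster
-- what changed: Replaced A's two O(n) rescans per index by one pre-sorted copy of the list plus an incrementally maintained sorted prefix queried with hand-written bisect_left, deriving the after-count as total-smaller minus before-count.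
import Mathlib
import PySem

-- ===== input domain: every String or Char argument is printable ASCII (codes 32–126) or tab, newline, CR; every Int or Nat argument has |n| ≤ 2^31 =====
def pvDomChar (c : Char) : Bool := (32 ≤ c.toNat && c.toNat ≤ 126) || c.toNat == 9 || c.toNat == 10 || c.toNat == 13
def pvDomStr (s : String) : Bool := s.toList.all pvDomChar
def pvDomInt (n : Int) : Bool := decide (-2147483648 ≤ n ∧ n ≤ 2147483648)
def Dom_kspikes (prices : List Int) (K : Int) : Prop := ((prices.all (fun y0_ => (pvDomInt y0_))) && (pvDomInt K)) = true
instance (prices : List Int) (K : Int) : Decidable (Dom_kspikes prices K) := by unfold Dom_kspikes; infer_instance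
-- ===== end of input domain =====

-- B replaces A's per-index quadratic rescans by one sorted copy plus an incrementally
-- maintained sorted prefix queried with binary search (after-count = total smaller − before-count).

-- ===== PORT A =====
def kspikes (prices : List Int) (K : Int) : Int :=
  let N := PySem.List.len prices
  (PySem.List.pyRange 0 N).foldl (fun spikes i =>
    let sb := (PySem.List.pyRange 0 i).foldl
      (fun acc j => if PySem.List.pyGetD prices j 0 < PySem.List.pyGetD prices i 0 then acc + 1 else acc) 0
    let sa := (PySem.List.pyRange (i + 1) N).foldl
      (fun acc j => if PySem.List.pyGetD prices j 0 < PySem.List.pyGetD prices i 0 then acc + 1 else acc) 0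
    if sb = K ∧ sa = K then spikes + 1 else spikes) 0

-- ===== PORT B =====
-- Source B's hand-written `_bisect_left` is exactly CPython's bisect_left lo/hi loop,
-- which is PySem.List.bisectLeft (the same loop, fuel-bounded).
def kspikes_alt (prices : List Int) (K : Int) : Int :=
  let srt := PySem.List.sorted prices (fun x => x)
  (prices.foldl (fun (st : List Int × Int) x =>
      let b := PySem.List.bisectLeft st.1 x
      let sp := if (b : Int) = K ∧ (PySem.List.bisectLeft srt x : Int) - (b : Int) = K
                then st.2 + 1 else st.2
      (PySem.List.insert st.1 (b : Int) x, sp))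
    ([], 0)).2

-- ===== PRECONDITION & SPEC =====
def Spec_kspikes (prices : List Int) (K : Int) (out : Int) : Prop := out = kspikes_alt prices K
instance (prices : List Int) (K : Int) (out : Int) : Decidable (Spec_kspikes prices K out) := by unfold Spec_kspikes; infer_instance

-- ===== CLAIM (what is proved, stated in full; the proofs are below) =====
def Claim_equal_kspikes : Prop := ∀ (prices : List Int) (K : Int), Dom_kspikes prices K → Spec_kspikes prices K (kspikes prices K)

-- ===== LEMMAS AND PROOFS =====

-- the common reference count: processing l after prefix pre, against the fixed whole list p
def bcount (p : List Int) (K : Int) (pre l : List Int) : Int :=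
  match l with
  | [] => 0
  | x :: r =>
    (if ((pre.countP (fun y => decide (y < x)) : Int) = K ∧
         ((p.countP (fun y => decide (y < x)) : Int) - (pre.countP (fun y => decide (y < x)) : Int) = K))
     then 1 else 0) + bcount p K (pre ++ [x]) r

lemma bisectLeft_eq_countP (s : List Int) (x : Int) (h : s.Pairwise (· ≤ ·)) :
    PySem.List.bisectLeft s x = s.countP (fun y => decide (y < x)) := by
  obtain ⟨hle, hlt, hge⟩ := PySem.List.bisectLeft_spec s x h
  set b := PySem.List.bisectLeft s x with hb
  have h1 : (s.take b).countP (fun y => decide (y < x)) = (s.take b).length := by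
    rw [List.countP_eq_length]
    intro a ha
    obtain ⟨j, hj, rfl⟩ := List.mem_iff_getElem.1 ha
    have hjb : j < b := by simp [List.length_take] at hj; omega
    have hjs : j < s.length := by simp [List.length_take] at hj; omega
    rw [List.getElem_take]
    exact decide_eq_true (hlt j hjs hjb)
  have h2 : (s.drop b).countP (fun y => decide (y < x)) = 0 := by
    rw [List.countP_eq_zero]
    intro a ha
    obtain ⟨j, hj, rfl⟩ := List.mem_iff_getElem.1 ha
    have hjs : b + j < s.length := by simp [List.length_drop] at hj; omega
    rw [List.getElem_drop]
    have := hge (b + j) hjs (by omega)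
    simp; omega
  conv_rhs => rw [(List.take_append_drop b s).symm]
  rw [List.countP_append, h1, h2, List.length_take]
  omega

lemma pairwise_insert_bisect (s : List Int) (x : Int) (h : s.Pairwise (· ≤ ·)) :
    (PySem.List.insert s ((PySem.List.bisectLeft s x : Nat) : Int) x).Pairwise (· ≤ ·) := by
  obtain ⟨hle, hlt, hge⟩ := PySem.List.bisectLeft_spec s x h
  set b := PySem.List.bisectLeft s x with hb
  rw [PySem.List.insert_natCast s b x hle]
  have htake : ∀ a ∈ s.take b, a < x := by
    intro a ha
    obtain ⟨j, hj, rfl⟩ := List.mem_iff_getElem.1 ha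
    have hjb : j < b := by simp [List.length_take] at hj; omega
    have hjs : j < s.length := by simp [List.length_take] at hj; omega
    rw [List.getElem_take]; exact hlt j hjs hjb
  have hdrop : ∀ a ∈ s.drop b, x ≤ a := by
    intro a ha
    obtain ⟨j, hj, rfl⟩ := List.mem_iff_getElem.1 ha
    have hjs : b + j < s.length := by simp [List.length_drop] at hj; omega
    rw [List.getElem_drop]; exact hge (b + j) hjs (by omega)
  rw [List.pairwise_append]
  refine ⟨(h.sublist (List.take_sublist b s)), ?_, ?_⟩
  · rw [List.pairwise_cons]
    exact ⟨hdrop, h.sublist (List.drop_sublist b s)⟩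
  · intro a ha c hc
    rcases List.mem_cons.1 hc with rfl | hc
    · exact le_of_lt (htake a ha)
    · exact le_of_lt ((htake a ha).trans_le (hdrop c hc))

lemma B_loop (p : List Int) (K : Int) (l : List Int) : ∀ (pre seen : List Int) (sp : Int),
    seen.Perm pre → seen.Pairwise (· ≤ ·) →
    (l.foldl (fun (st : List Int × Int) x =>
      let b := PySem.List.bisectLeft st.1 x
      let sp := if (b : Int) = K ∧
          (PySem.List.bisectLeft (PySem.List.sorted p (fun x => x)) x : Int) - (b : Int) = K
        then st.2 + 1 else st.2
      (PySem.List.insert st.1 (b : Int) x, sp)) (seen, sp)).2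
    = sp + bcount p K pre l := by
  induction l with
  | nil => intro pre seen sp _ _; simp [bcount]
  | cons x r ih =>
    intro pre seen sp hperm hsort
    obtain ⟨hle, hlt, hge⟩ := PySem.List.bisectLeft_spec seen x hsort
    have hbs : PySem.List.bisectLeft seen x = pre.countP (fun y => decide (y < x)) := by
      rw [bisectLeft_eq_countP seen x hsort, hperm.countP_eq]
    have hsrt : PySem.List.bisectLeft (PySem.List.sorted p (fun x => x)) x
        = p.countP (fun y => decide (y < x)) := by
      rw [bisectLeft_eq_countP _ x (PySem.List.sorted_pairwise p (fun x => x)),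
        (PySem.List.sorted_perm p (fun x => x) false).countP_eq]
    have hp2 : (PySem.List.insert seen ((PySem.List.bisectLeft seen x : Nat) : Int) x).Perm (pre ++ [x]) := by
      rw [PySem.List.insert_natCast seen _ x hle]
      refine List.Perm.trans List.perm_middle ?_
      rw [List.take_append_drop]
      exact (hperm.cons x).trans (List.perm_append_singleton x pre).symm
    simp only [List.foldl_cons]
    rw [ih (pre ++ [x]) _ _ hp2 (pairwise_insert_bisect seen x hsort), bcount, hbs, hsrt]
    split_ifs <;> ring

lemma countP_range_getD (p : List Int) (q : Int → Bool) :
    ∀ i, i ≤ p.length → (List.range i).countP (fun k => q (p.getD k 0)) = (p.take i).countP q := by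
  intro i
  induction i with
  | zero => simp
  | succ n ih =>
    intro h
    rw [List.range_succ, List.countP_append, ih (by omega), List.take_add_one,
      List.countP_append]
    simp [List.getElem?_eq_getElem (by omega : n < p.length)]

lemma innerA1 (p : List Int) (v : Int) (i : Nat) (h : i ≤ p.length) :
    (PySem.List.pyRange 0 (i : Int)).foldl
      (fun acc j => if PySem.List.pyGetD p j 0 < v then acc + 1 else acc) 0
    = (((p.take i).countP (fun y => decide (y < v)) : Nat) : Int) := by
  rw [PySem.List.pyRange_zero_natCast, List.foldl_map,
    PySem.List.foldl_ite_add_one (fun k : Nat => PySem.List.pyGetD p (↑k) 0 < v)]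
  simp only [PySem.List.pyGetD_natCast, zero_add]
  exact_mod_cast congrArg (Nat.cast : Nat → Int) (countP_range_getD p (fun y => decide (y < v)) i h)

lemma innerA2 (p : List Int) (v : Int) (i : Nat) :
    (PySem.List.pyRange ((i : Int) + 1) (PySem.List.len p)).foldl
      (fun acc j => if PySem.List.pyGetD p j 0 < v then acc + 1 else acc) 0
    = (((p.drop (i + 1)).countP (fun y => decide (y < v)) : Nat) : Int) := by
  have h0 : (0 : Int) ≤ (i : Int) + 1 := by omega
  rw [PySem.List.foldl_pyRange_pyGetD p 0 (fun acc y => if y < v then acc + 1 else acc) 0 h0]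
  have : ((i : Int) + 1).toNat = i + 1 := by omega
  rw [this, PySem.List.foldl_ite_add_one (fun y : Int => y < v)]
  simp

lemma countP_decomp (p : List Int) (q : Int → Bool) (i : Nat) (hip : i < p.length) :
    p.countP q = (p.take i).countP q + ((if q p[i] then 1 else 0) + (p.drop (i + 1)).countP q) := by
  conv_lhs => rw [← List.take_append_drop i p, ← List.getElem_cons_drop hip]
  rw [List.countP_append, List.countP_cons]
  ring

lemma A_loop (p : List Int) (K : Int) :
    ∀ (fuel i : Nat), p.length - i ≤ fuel → i ≤ p.length → ∀ (sp : Int),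
    ((PySem.List.pyRange (i : Int) (PySem.List.len p)).foldl (fun spikes i =>
      let sb := (PySem.List.pyRange 0 i).foldl
        (fun acc j => if PySem.List.pyGetD p j 0 < PySem.List.pyGetD p i 0 then acc + 1 else acc) 0
      let sa := (PySem.List.pyRange (i + 1) (PySem.List.len p)).foldl
        (fun acc j => if PySem.List.pyGetD p j 0 < PySem.List.pyGetD p i 0 then acc + 1 else acc) 0
      if sb = K ∧ sa = K then spikes + 1 else spikes) sp)
    = sp + bcount p K (p.take i) (p.drop i) := by
  have hlen : PySem.List.len p = (p.length : Int) := by simp [PySem.List.len]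
  intro fuel
  induction fuel with
  | zero =>
    intro i hf hi sp
    have : i = p.length := by omega
    subst this
    rw [hlen]
    simp [PySem.List.pyRange, bcount]
  | succ n ih =>
    intro i hf hi sp
    by_cases hip : i < p.length
    · have hcons : PySem.List.pyRange (i : Int) (PySem.List.len p)
          = (i : Int) :: PySem.List.pyRange ((i : Int) + 1) (PySem.List.len p) := by
        rw [hlen]; exact PySem.List.pyRange_one_cons (by exact_mod_cast hip)
      have hv : PySem.List.pyGetD p (i : Int) 0 = p[i] := by
        rw [PySem.List.pyGetD_natCast, List.getD_eq_getElem p 0 hip]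
      have hsucc : ((i : Int) + 1) = ((i + 1 : Nat) : Int) := by push_cast; ring
      rw [hcons, List.foldl_cons]
      simp only [hv]
      rw [innerA1 p _ i (by omega), innerA2 p _ i, hsucc,
        ih (i + 1) (by omega) (by omega)]
      -- decomposition of the total count
      have hdec : p.countP (fun y => decide (y < p[i]))
          = (p.take i).countP (fun y => decide (y < p[i]))
            + (p.drop (i + 1)).countP (fun y => decide (y < p[i])) := by
        have := countP_decomp p (fun y => decide (y < p[i])) i hip
        simpa using this
      have hcond : ((((p.take i).countP (fun y => decide (y < p[i])) : Nat) : Int) = K ∧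
            (((p.drop (i + 1)).countP (fun y => decide (y < p[i])) : Nat) : Int) = K)
          ↔ ((((p.take i).countP (fun y => decide (y < p[i])) : Nat) : Int) = K ∧
            ((p.countP (fun y => decide (y < p[i])) : Nat) : Int)
              - (((p.take i).countP (fun y => decide (y < p[i])) : Nat) : Int) = K) := by
        rw [hdec]; push_cast; constructor <;> (intro ⟨h1, h2⟩; exact ⟨h1, by omega⟩)
      have hdrop : p.drop i = p[i] :: p.drop (i + 1) := (List.getElem_cons_drop hip).symm
      have htake : p.take (i + 1) = p.take i ++ [p[i]] := by
        rw [List.take_add_one, List.getElem?_eq_getElem hip]; rfl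
      rw [hdrop, bcount, ← htake]
      rw [if_congr hcond rfl rfl]
      split_ifs <;> ring
    · have : i = p.length := by omega
      subst this
      rw [hlen]
      simp [PySem.List.pyRange, bcount]

-- ===== VERDICT (by name: the statement is the Claim_ definition above) =====
theorem kspikes_spec : Claim_equal_kspikes := by
  intro prices K _
  unfold Spec_kspikes kspikes kspikes_alt
  have hA := A_loop prices K prices.length 0 (by omega) (by omega) 0
  simp only [Nat.cast_zero, List.take_zero, List.drop_zero] at hA
  rw [hA, B_loop prices K prices [] [] 0 (List.Perm.refl []) (List.Pairwise.nil)]
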